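-- pv_equiv track=rewrite | github.com/Vangogh911/homework_python_5 | Ex_4.py | unpacking
-- ===== SOURCE A (Python) =====
-- def symbol_repeater(symbol, count):
--     output_string = ""
--     for i in range(count):
--         output_string += symbol
--     return output_string
--
-- def unpacking(packed_text):
--     count = ""
--     unpacked_text = ""
--     for symbol in packed_text:
--         if symbol.isdigit():
--             count += symbol
--         else:
--             unpacked_text += symbol_repeater(symbol, int(count))
--             count = ""
--     return unpacked_text
-- ===== SOURCE B (Python) =====
-- def unpacking(packed_text):
--     parts = []
--     i = 0
--     n = len(packed_text)
--     while i < n: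
--         j = i
--         while j < n and packed_text[j].isdigit():
--             j += 1
--         if j == n:
--             break
--         parts.append(packed_text[j] * int(packed_text[i:j]))
--         i = j + 1
--     return ''.join(parts)
-- ===== Notes on version B (the rewrite author's own statement) =====
-- stated objective: alternative
-- what changed: Replaced the per-character state machine (digit accumulator string + character-by-character repeat loop) with a two-pointer tokenizer that scans each maximal digit run as a slice, builds each expanded chunk by string multiplication, and joins the collected chunks at the end.
import Mathlib
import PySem

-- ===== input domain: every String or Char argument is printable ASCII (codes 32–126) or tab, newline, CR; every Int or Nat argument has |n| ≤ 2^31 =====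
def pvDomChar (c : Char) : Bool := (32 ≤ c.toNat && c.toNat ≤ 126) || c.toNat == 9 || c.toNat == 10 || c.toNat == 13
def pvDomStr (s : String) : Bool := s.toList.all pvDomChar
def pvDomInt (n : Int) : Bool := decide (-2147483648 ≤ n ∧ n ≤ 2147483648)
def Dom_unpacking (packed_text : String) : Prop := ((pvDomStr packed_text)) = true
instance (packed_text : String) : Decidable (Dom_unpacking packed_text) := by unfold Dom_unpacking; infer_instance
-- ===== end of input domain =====

-- B replaces A's per-character state machine with a two-pointer tokenizer over maximal
-- digit runs (objective: alternative decomposition, same cost). Where the Python raises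
-- ValueError (a non-digit with no preceding count digits), both ports encode the error as
-- none and fall back to an empty result; Pre_ excludes exactly those inputs.

-- ===== PORT A =====
-- helper symbol_repeater: builds the output by appending `symbol` count times
def symbolRepeater (symbol : Char) (count : Int) : List Char :=
  (PySem.List.pyRange 0 count 1).foldl (fun out _ => out ++ [symbol]) []

-- the for-loop of `unpacking` over (remaining chars, count, unpacked_text); none = int() ValueError
def unpackingAux : List Char → List Char → List Char → Option (List Char)
  | [], _, out => some out
  | c :: rest, count, out =>
    if PySem.Chars.isdigit c then unpackingAux rest (count ++ [c]) out
    else match PySem.Int.ofChars? count with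
      | none => none
      | some n => unpackingAux rest [] (out ++ symbolRepeater c n)

def unpacking (packed_text : String) : String :=
  String.mk ((unpackingAux packed_text.toList [] []).getD [])

-- ===== PORT B =====
-- the inner `while j < n and packed_text[j].isdigit()` scan: (digit run, remainder)
def scanDigits : List Char → List Char × List Char
  | [] => ([], [])
  | c :: rest =>
    if PySem.Chars.isdigit c then
      let p := scanDigits rest
      (c :: p.1, p.2)
    else ([], c :: rest)

-- cited by unpackingAltAux's decreasing_by
theorem scanDigits_snd_length (cs : List Char) : (scanDigits cs).2.length ≤ cs.length := by
  induction cs with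
  | nil => simp [scanDigits]
  | cons c rest ih =>
    simp only [scanDigits]
    split
    · exact Nat.le_succ_of_le ih
    · simp

-- the outer while-loop of B, accumulating the `parts` list; none = int() ValueError
def unpackingAltAux (cs : List Char) (parts : List (List Char)) : Option (List (List Char)) :=
  match h : scanDigits cs with
  | (_, []) => some parts
  | (ds, c :: rest) =>
    match PySem.Int.ofChars? ds with
    | none => none
    | some n => unpackingAltAux rest (parts ++ [PySem.List.pyRepeat [c] n])
termination_by cs.length
decreasing_by
  have hl := scanDigits_snd_length cs
  rw [h] at hl
  simp at hl
  omega

def unpacking_alt (packed_text : String) : String :=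
  String.mk (PySem.Chars.join [] ((unpackingAltAux packed_text.toList []).getD []))

-- ===== PRECONDITION & SPEC =====
-- Pre_ excludes exactly the inputs on which the Python raises ValueError (a non-digit
-- character not immediately preceded by a digit): every non-digit must follow a digit.
def Pre_unpacking (packed_text : String) : Prop :=
  ((match packed_text.toList with | [] => true | c :: _ => PySem.Chars.isdigit c) &&
   (packed_text.toList.zip packed_text.toList.tail).all
     (fun p => PySem.Chars.isdigit p.2 || PySem.Chars.isdigit p.1)) = true

instance (packed_text : String) : Decidable (Pre_unpacking packed_text) := by
  unfold Pre_unpacking; infer_instance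

def pvWitness_unpacking : String := "3a12b"

def Spec_unpacking (packed_text : String) (out : String) : Prop := out = unpacking_alt packed_text
instance (packed_text : String) (out : String) : Decidable (Spec_unpacking packed_text out) := by
  unfold Spec_unpacking; infer_instance

-- ===== CLAIM (what is proved, stated in full; the proofs are below) =====
def Claim_equal_unpacking : Prop := ∀ (packed_text : String), Dom_unpacking packed_text → Pre_unpacking packed_text → Spec_unpacking packed_text (unpacking packed_text)

-- ===== LEMMAS AND PROOFS =====

theorem scanDigits_eq_append (cs : List Char) : cs = (scanDigits cs).1 ++ (scanDigits cs).2 := by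
  induction cs with
  | nil => simp [scanDigits]
  | cons c rest ih =>
    simp only [scanDigits]
    split
    · simpa using ih
    · simp

theorem scanDigits_fst_digits (cs : List Char) :
    ∀ c ∈ (scanDigits cs).1, PySem.Chars.isdigit c = true := by
  induction cs with
  | nil => simp [scanDigits]
  | cons c rest ih =>
    simp only [scanDigits]
    split
    · next hd =>
      intro x hx
      rcases List.mem_cons.mp hx with hx | hx
      · subst hx; exact hd
      · exact ih x hx
    · simp

theorem symbolRepeater_eq (c : Char) (n : Int) :
    symbolRepeater c n = PySem.List.pyRepeat [c] n := by
  unfold symbolRepeater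
  rw [PySem.List.foldl_append_singleton_eq_map (f := fun _ => c)]
  rw [PySem.List.pyRepeat_singleton]
  simp [PySem.List.length_pyRange_one]

theorem join_nil_cons (x : List Char) (ps : List (List Char)) :
    PySem.Chars.join [] (x :: ps) = x ++ PySem.Chars.join [] ps := by
  cases ps with
  | nil => simp [PySem.Chars.join_singleton, PySem.Chars.join_nil]
  | cons y t => rw [PySem.Chars.join_cons_cons]; simp

theorem digit_prefix_fold (ds : List Char) (hd : ∀ c ∈ ds, PySem.Chars.isdigit c = true) :
    ∀ (rest count out : List Char),
      unpackingAux (ds ++ rest) count out = unpackingAux rest (count ++ ds) out := by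
  induction ds with
  | nil => intro rest count out; simp
  | cons d t ih =>
    intro rest count out
    have hdd : PySem.Chars.isdigit d = true := hd d (List.mem_cons_self ..)
    simp only [List.cons_append, unpackingAux, hdd, if_pos]
    rw [ih (fun c hc => hd c (List.mem_cons_of_mem _ hc))]
    simp

theorem altAux_step_nil (cs : List Char) (parts : List (List Char))
    (h : (scanDigits cs).2 = []) : unpackingAltAux cs parts = some parts := by
  rw [unpackingAltAux]
  split
  · rfl
  · next ds c rest heq => rw [heq] at h; simp at h
theorem altAux_step_cons (cs : List Char) (parts : List (List Char)) (ds : List Char)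
    (c : Char) (rest : List Char) (h : scanDigits cs = (ds, c :: rest)) :
    unpackingAltAux cs parts =
      match PySem.Int.ofChars? ds with
      | none => none
      | some n => unpackingAltAux rest (parts ++ [PySem.List.pyRepeat [c] n]) := by
  rw [unpackingAltAux]
  split
  · next a heq => rw [heq] at h; simp at h
  · next ds' c' rest' heq =>
    rw [heq] at h
    injection h with h1 h2
    injection h2 with h3 h4
    subst h1; subst h3; subst h4
    rfl
theorem altAux_acc (k : Nat) : ∀ (cs : List Char), cs.length ≤ k → ∀ (parts : List (List Char)),
    unpackingAltAux cs parts = (unpackingAltAux cs []).map (parts ++ ·) := by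
  induction k with
  | zero =>
    intro cs hcs parts
    have hcs0 : cs = [] := List.length_eq_zero_iff.mp (Nat.le_zero.mp hcs)
    subst hcs0
    rw [altAux_step_nil _ _ (by simp [scanDigits]), altAux_step_nil _ _ (by simp [scanDigits])]
    simp
  | succ k ih =>
    intro cs hcs parts
    cases hs : (scanDigits cs).2 with
    | nil => rw [altAux_step_nil _ _ hs, altAux_step_nil _ _ hs]; simp
    | cons c rest =>
      have hsc : scanDigits cs = ((scanDigits cs).1, c :: rest) := by rw [← hs]
      rw [altAux_step_cons _ _ _ _ _ hsc, altAux_step_cons _ _ _ _ _ hsc]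
      cases hn : PySem.Int.ofChars? (scanDigits cs).1 with
      | none => simp
      | some n =>
        have hlen : rest.length ≤ k := by
          have h2 := scanDigits_snd_length cs
          rw [hs] at h2
          simp at h2
          omega
        simp only []
        rw [ih rest hlen (parts ++ [PySem.List.pyRepeat [c] n]),
            ih rest hlen ([] ++ [PySem.List.pyRepeat [c] n])]
        cases unpackingAltAux rest [] <;> simp
theorem scanDigits_snd_head (cs : List Char) :
    ∀ c ∈ (scanDigits cs).2.head?, PySem.Chars.isdigit c = false := by
  induction cs with
  | nil => simp [scanDigits]
  | cons c rest ih =>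
    simp only [scanDigits]
    split
    · exact ih
    · next hnd => simp_all
theorem main_eq (k : Nat) : ∀ (cs : List Char), cs.length ≤ k → ∀ (out : List Char),
    unpackingAux cs [] out =
      (unpackingAltAux cs []).map (fun ps => out ++ PySem.Chars.join [] ps) := by
  induction k with
  | zero =>
    intro cs hcs out
    have hcs0 : cs = [] := List.length_eq_zero_iff.mp (Nat.le_zero.mp hcs)
    subst hcs0
    rw [altAux_step_nil _ _ (by simp [scanDigits])]
    simp [unpackingAux, PySem.Chars.join_nil]
  | succ k ih =>
    intro cs hcs out
    have hsplit := scanDigits_eq_append cs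
    have hdig := scanDigits_fst_digits cs
    cases hs : (scanDigits cs).2 with
    | nil =>
      rw [altAux_step_nil _ _ hs]
      rw [hs] at hsplit
      conv_lhs => rw [hsplit]
      rw [digit_prefix_fold _ hdig]
      simp [unpackingAux, PySem.Chars.join_nil]
    | cons c rest =>
      have hsc : scanDigits cs = ((scanDigits cs).1, c :: rest) := by rw [← hs]
      rw [altAux_step_cons _ _ _ _ _ hsc]
      rw [hs] at hsplit
      conv_lhs => rw [hsplit]
      rw [digit_prefix_fold _ hdig]
      have hnd : PySem.Chars.isdigit c = false := by
        have := scanDigits_snd_head cs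
        rw [hs] at this
        exact this c rfl
      simp only [unpackingAux, hnd, Bool.false_eq_true, if_false, List.nil_append]
      cases hn : PySem.Int.ofChars? (scanDigits cs).1 with
      | none => simp
      | some n =>
        have hlen : rest.length ≤ k := by
          have h2 := scanDigits_snd_length cs
          rw [hs] at h2
          simp at h2
          omega
        show unpackingAux rest [] (out ++ symbolRepeater c n) =
          Option.map (fun ps => out ++ PySem.Chars.join [] ps)
            (unpackingAltAux rest [PySem.List.pyRepeat [c] n])
        rw [ih rest hlen (out ++ symbolRepeater c n)]
        rw [altAux_acc rest.length rest (Nat.le_refl _) [PySem.List.pyRepeat [c] n]]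
        cases unpackingAltAux rest [] <;>
          simp [join_nil_cons, symbolRepeater_eq, List.append_assoc]

-- ===== VERDICT (by name: the statement is the Claim_ definition above) =====
theorem unpacking_spec : Claim_equal_unpacking := by
  intro s _ _
  unfold Spec_unpacking unpacking unpacking_alt
  have h := main_eq s.toList.length s.toList (Nat.le_refl _) []
  cases hb : unpackingAltAux s.toList [] with
  | none => rw [hb] at h; simp [h]
  | some ps => rw [hb] at h; simp at h; simp [h]
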